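-- pv_equiv track=rewrite | github.com/chrystyan96/causal-halting | skills/causal-halting/scripts/chc_check.py | find_keyword_top_level
-- ===== SOURCE A (Python) =====
-- def find_keyword_top_level(text: str, keyword: str) -> int:
--     depth = 0
--     needle = f" {keyword} "
--     padded = f" {text} "
--     for index, char in enumerate(padded):
--         if char == "(":
--             depth += 1
--         elif char == ")":
--             depth -= 1
--         elif depth == 0 and padded.startswith(needle, index):
--             return max(index - 1, 0)
--     return -1
-- ===== SOURCE B (Python) =====
-- def find_keyword_top_level(text: str, keyword: str) -> int:
--     needle = f" {keyword} "
--     padded = f" {text} "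
--     start = 0
--     while True:
--         index = padded.find(needle, start)
--         if index == -1:
--             return -1
--         if padded.count("(", 0, index) == padded.count(")", 0, index):
--             return max(index - 1, 0)
--         start = index + 1
-- ===== Notes on version B (the rewrite author's own statement) =====
-- stated objective: faster
-- what changed: Replaced A's fused per-character state machine (tracking paren depth while scanning) with repeated substring search (str.find) plus a prefix paren-count check at each hit.
import Mathlib
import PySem

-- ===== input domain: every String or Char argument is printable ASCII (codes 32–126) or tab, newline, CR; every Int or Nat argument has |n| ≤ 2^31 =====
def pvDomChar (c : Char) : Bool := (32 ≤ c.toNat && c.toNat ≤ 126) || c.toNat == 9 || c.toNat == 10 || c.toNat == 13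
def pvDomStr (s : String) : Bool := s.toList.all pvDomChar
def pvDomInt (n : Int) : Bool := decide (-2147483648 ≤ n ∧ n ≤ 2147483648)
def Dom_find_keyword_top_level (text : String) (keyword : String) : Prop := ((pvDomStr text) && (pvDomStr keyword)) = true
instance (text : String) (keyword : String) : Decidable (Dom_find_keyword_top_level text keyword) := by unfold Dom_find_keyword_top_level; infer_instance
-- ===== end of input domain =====

-- B replaces A's fused char-by-char scan with repeated substring search plus prefix paren counts (C-level find/count calls instead of a per-character Python loop; return value only, no mutation).

-- ===== PORT A =====
-- the enumerate loop of A, over the remaining characters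
def pvFindA (needle : List Char) (depth : Int) (index : Nat) : List Char → Int
  | [] => -1
  | c :: rest =>
    if c = '(' then pvFindA needle (depth + 1) (index + 1) rest
    else if c = ')' then pvFindA needle (depth - 1) (index + 1) rest
    else if depth = 0 ∧ needle.isPrefixOf (c :: rest) then max ((index : Int) - 1) 0
    else pvFindA needle depth (index + 1) rest

def find_keyword_top_level (text : String) (keyword : String) : Int :=
  let needle := ' ' :: (keyword.toList ++ [' '])
  let padded := ' ' :: (text.toList ++ [' '])
  pvFindA needle 0 0 padded

-- ===== PORT B =====
-- port of padded.find(needle, start) for the nonempty needles B builds: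
-- lowest index ≥ start where needle occurs (none = Python's -1)
def pvFindFrom (padded needle : List Char) (start : Nat) : Option Nat :=
  (List.range' start (padded.length - start)).find? (fun i => needle.isPrefixOf (padded.drop i))

-- B's while loop
def pvLoopB (padded needle : List Char) (start : Nat) : Int :=
  match h : pvFindFrom padded needle start with
  | none => -1
  | some index =>
    if ((padded.take index).count '(' : Int) = ((padded.take index).count ')' : Int) then
      max ((index : Int) - 1) 0
    else pvLoopB padded needle (index + 1)
termination_by padded.length - start
decreasing_by
  have hm := List.mem_of_find?_eq_some h
  rw [List.mem_range'] at hm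
  obtain ⟨i, hi, rfl⟩ := hm
  omega

def find_keyword_top_level_alt (text : String) (keyword : String) : Int :=
  let needle := ' ' :: (keyword.toList ++ [' '])
  let padded := ' ' :: (text.toList ++ [' '])
  pvLoopB padded needle 0

-- ===== PRECONDITION & SPEC =====
def Spec_find_keyword_top_level (text : String) (keyword : String) (out : Int) : Prop := out = find_keyword_top_level_alt text keyword
instance (text : String) (keyword : String) (out : Int) : Decidable (Spec_find_keyword_top_level text keyword out) := by unfold Spec_find_keyword_top_level; infer_instance

-- ===== CLAIM (what is proved, stated in full; the proofs are below) =====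
def Claim_equal_find_keyword_top_level : Prop := ∀ (text : String) (keyword : String), Dom_find_keyword_top_level text keyword → Spec_find_keyword_top_level text keyword (find_keyword_top_level text keyword)

-- ===== LEMMAS AND PROOFS =====

-- balance as Int: count '(' minus count ')'
def pvBal (p : List Char) : Int := (p.count '(' : Int) - (p.count ')' : Int)

-- a top-level occurrence at index i
def pvCond (padded needle : List Char) (i : Nat) : Bool :=
  needle.isPrefixOf (padded.drop i) && decide (pvBal (padded.take i) = 0)

-- the common specification both loops compute: first top-level occurrence from s
def pvSpecFrom (padded needle : List Char) (s : Nat) : Int :=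
  match (List.range' s (padded.length - s)).find? (pvCond padded needle) with
  | none => -1
  | some i => max ((i : Int) - 1) 0

theorem pvFind?_ext {α : Type} (p q : α → Bool) (l : List α) (h : ∀ a, p a = q a) :
    l.find? p = l.find? q := by
  have : p = q := funext h
  rw [this]

theorem pvConsStep (n : List Char) (c : Char) (rest : List Char) (d d' : Int) (i : Nat)
    (h0 : (n.isPrefixOf (c :: rest) && decide (d = 0)) = false)
    (hshift : ∀ j : Nat, decide (d + pvBal (c :: rest.take j) = 0) = decide (d' + pvBal (rest.take j) = 0)) :
    (match (List.range (c :: rest).length).find?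
        (fun j => n.isPrefixOf ((c :: rest).drop j) && decide (d + pvBal ((c :: rest).take j) = 0)) with
      | none => (-1 : Int)
      | some j => max ((i : Int) + (j : Int) - 1) 0)
    = match (List.range rest.length).find?
        (fun j => n.isPrefixOf (rest.drop j) && decide (d' + pvBal (rest.take j) = 0)) with
      | none => (-1 : Int)
      | some j => max (((i + 1 : Nat) : Int) + (j : Int) - 1) 0 := by
  rw [List.length_cons, List.range_succ_eq_map, List.find?_cons]
  have h0' : (n.isPrefixOf ((c :: rest).drop 0) && decide (d + pvBal ((c :: rest).take 0) = 0)) = false := by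
    simpa [pvBal] using h0
  rw [h0', List.find?_map]
  have hpt : ((fun j => n.isPrefixOf ((c :: rest).drop j) && decide (d + pvBal ((c :: rest).take j) = 0)) ∘ Nat.succ)
      = (fun j => n.isPrefixOf (rest.drop j) && decide (d' + pvBal (rest.take j) = 0)) := by
    funext j
    simp only [Function.comp, List.drop_succ_cons, List.take_succ_cons]
    congr 1
    exact hshift j
  rw [hpt]
  cases (List.range rest.length).find? _ with
  | none => simp
  | some j =>
    simp only [Option.map_some]
    push_cast
    ring_nf

theorem pvFindA_spec (m : List Char) :
    ∀ (rest : List Char) (d : Int) (i : Nat),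
    pvFindA (' ' :: m) d i rest =
      match (List.range rest.length).find?
          (fun j => (' ' :: m).isPrefixOf (rest.drop j) && decide (d + pvBal (rest.take j) = 0)) with
      | none => -1
      | some j => max ((i : Int) + (j : Int) - 1) 0 := by
  intro rest
  induction rest with
  | nil => intro d i; simp [pvFindA]
  | cons c rest ih =>
    intro d i
    by_cases hc : c = '('
    · subst hc
      rw [pvFindA, if_pos rfl, ih (d + 1) (i + 1),
        pvConsStep (' ' :: m) '(' rest d (d + 1) i (by simp [List.isPrefixOf])
          (fun j => by
            have : d + pvBal ('(' :: rest.take j) = d + 1 + pvBal (rest.take j) := by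
              simp [pvBal]; ring
            rw [this])]
    · by_cases hc2 : c = ')'
      · subst hc2
        rw [pvFindA, if_neg (by decide), if_pos rfl, ih (d - 1) (i + 1),
          pvConsStep (' ' :: m) ')' rest d (d - 1) i (by simp [List.isPrefixOf])
            (fun j => by
              have : d + pvBal (')' :: rest.take j) = d - 1 + pvBal (rest.take j) := by
                simp [pvBal]; ring
              rw [this])]
      · by_cases hm : d = 0 ∧ (' ' :: m).isPrefixOf (c :: rest)
        · rw [pvFindA, if_neg hc, if_neg hc2, if_pos hm]
          have h0 : ((' ' :: m).isPrefixOf ((c :: rest).drop 0) &&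
              decide (d + pvBal ((c :: rest).take 0) = 0)) = true := by
            simp [pvBal, hm.2, hm.1]
          rw [List.length_cons, List.range_succ_eq_map, List.find?_cons, h0]
          simp
        · rw [pvFindA, if_neg hc, if_neg hc2, if_neg hm, ih d (i + 1),
            pvConsStep (' ' :: m) c rest d d i ?_
              (fun j => by
                have : pvBal (c :: rest.take j) = pvBal (rest.take j) := by
                  simp [pvBal, hc, hc2]
                rw [this])]
          by_cases hp : (' ' :: m).isPrefixOf (c :: rest)
          · simp only [hp, Bool.true_and, decide_eq_false_iff_not]
            intro h'; exact hm ⟨h', hp⟩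
          · simp [hp]

theorem pvFind?_range'_some {p : Nat → Bool} :
    ∀ (k s idx : Nat), (List.range' s k).find? p = some idx →
      s ≤ idx ∧ idx < s + k ∧ p idx = true ∧ ∀ j, s ≤ j → j < idx → p j = false := by
  intro k
  induction k with
  | zero => intro s idx h; simp at h
  | succ k ih =>
    intro s idx h
    rw [List.range'_succ, List.find?_cons] at h
    by_cases hp : p s
    · rw [hp] at h
      injection h with h
      subst h
      exact ⟨le_refl _, by omega, hp, fun j h1 h2 => absurd (lt_of_le_of_lt h1 h2) (lt_irrefl _)⟩
    · rw [Bool.not_eq_true] at hp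
      rw [hp] at h
      obtain ⟨h1, h2, h3, h4⟩ := ih (s + 1) idx h
      refine ⟨by omega, by omega, h3, fun j hj1 hj2 => ?_⟩
      by_cases hjs : j = s
      · subst hjs; exact hp
      · exact h4 j (by omega) hj2

theorem pvSpecFrom_skip (padded needle : List Char) :
    ∀ (d s : Nat), (∀ j, s ≤ j → j < s + d → pvCond padded needle j = false) →
      s + d ≤ padded.length →
      pvSpecFrom padded needle s = pvSpecFrom padded needle (s + d) := by
  intro d
  induction d with
  | zero => intro s _ _; rfl
  | succ d ih =>
    intro s hcond hlen
    have hs : s < padded.length := by omega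
    have h1 : padded.length - s = (padded.length - (s + 1)) + 1 := by omega
    have : pvSpecFrom padded needle s = pvSpecFrom padded needle (s + 1) := by
      unfold pvSpecFrom
      rw [h1, List.range'_succ, List.find?_cons, hcond s (le_refl _) (by omega)]
    rw [this]
    have := ih (s + 1) (fun j hj1 hj2 => hcond j (by omega) (by omega)) (by omega)
    rw [this]
    congr 1
    omega

theorem pvLoopB_spec (padded needle : List Char) :
    ∀ (k s : Nat), padded.length - s ≤ k →
      pvLoopB padded needle s = pvSpecFrom padded needle s := by
  intro k
  induction k with
  | zero =>
    intro s hs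
    have h0 : padded.length - s = 0 := by omega
    rw [pvLoopB]
    unfold pvFindFrom pvSpecFrom
    rw [h0]
    simp
  | succ k ih =>
    intro s hs
    rw [pvLoopB]
    split
    · next hf =>
      unfold pvFindFrom at hf
      rw [List.find?_eq_none] at hf
      unfold pvSpecFrom
      rw [List.find?_eq_none.mpr ?_]
      intro x hx
      have := hf x hx
      simp [pvCond, this]
    · next index hf =>
      unfold pvFindFrom at hf
      obtain ⟨h1, h2, h3, h4⟩ := pvFind?_range'_some _ _ _ hf
      have hidx : index < padded.length := by omega
      by_cases hb : ((padded.take index).count '(' : Int) = ((padded.take index).count ')' : Int)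
      · rw [if_pos hb]
        have hskip := pvSpecFrom_skip padded needle (index - s) s
          (fun j hj1 hj2 => by
            have := h4 j hj1 (by omega)
            simp [pvCond, this])
          (by omega)
        rw [show s + (index - s) = index by omega] at hskip
        rw [hskip]
        unfold pvSpecFrom
        have h5 : padded.length - index = (padded.length - (index + 1)) + 1 := by omega
        rw [h5, List.range'_succ, List.find?_cons]
        have hc : pvCond padded needle index = true := by
          simp only [pvCond, pvBal]
          rw [h3, Bool.true_and]
          simp [hb]
        rw [hc]
      · rw [if_neg hb]
        have hrec := ih (index + 1) (by omega)
        rw [hrec]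
        have hskip := pvSpecFrom_skip padded needle (index + 1 - s) s
          (fun j hj1 hj2 => by
            by_cases hji : j = index
            · subst hji
              simp only [pvCond, pvBal]
              simp
              intro _
              omega
            · have := h4 j hj1 (by omega)
              simp [pvCond, this])
          (by omega)
        rw [show s + (index + 1 - s) = index + 1 by omega] at hskip
        rw [hskip]

-- ===== VERDICT (by name: the statement is the Claim_ definition above) =====
theorem find_keyword_top_level_spec : Claim_equal_find_keyword_top_level := by
  intro text keyword _
  unfold Spec_find_keyword_top_level find_keyword_top_level find_keyword_top_level_alt
  simp only []
  rw [pvFindA_spec (keyword.toList ++ [' '])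
      (' ' :: (text.toList ++ [' '])) 0 0]
  rw [pvLoopB_spec (' ' :: (text.toList ++ [' '])) (' ' :: (keyword.toList ++ [' '])) 
      (' ' :: (text.toList ++ [' '])).length 0 (by omega)]
  unfold pvSpecFrom
  rw [Nat.sub_zero, ← List.range_eq_range']
  rw [pvFind?_ext _ (pvCond (' ' :: (text.toList ++ [' '])) (' ' :: (keyword.toList ++ [' ']))) _ ?_]
  · cases (List.range _).find? _ with
    | none => rfl
    | some j => simp
  · intro j
    simp [pvCond]
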